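-- pv_equiv track=rewrite | github.com/pilecki/codewars | main.py | oblicz
-- ===== SOURCE A (Python) =====
-- def oblicz(a, n):
--
--     kasy = a[:n]
--     klient = a[n:]
--     kasy.sort()
--
--     for x in range(len(klient)):
--         kasy.sort()
--         kasy[0] += klient[x]
--     r = max(kasy)
--     return r
-- ===== SOURCE B (Python) =====
-- def oblicz(a, n):
--     kasy = sorted(a[:n])
--     for c in a[n:]:
--         x = kasy[0] + c
--         kasy.pop(0)
--         lo, hi = 0, len(kasy)
--         while lo < hi:
--             mid = (lo + hi) // 2
--             if kasy[mid] < x: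
--                 lo = mid + 1
--             else:
--                 hi = mid
--         kasy.insert(lo, x)
--     return kasy[-1]
-- ===== Notes on version B (the rewrite author's own statement) =====
-- stated objective: faster
-- what changed: A re-sorts the whole cashier list before every client and takes max at the end; B sorts once and keeps the list sorted by popping the minimum and re-inserting the updated load at the position found by a hand-written binary search, returning the last element.
-- outside the precondition, e.g. on oblicz([1, 2], 0): A raises IndexError, B raises IndexError
import Mathlib
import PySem

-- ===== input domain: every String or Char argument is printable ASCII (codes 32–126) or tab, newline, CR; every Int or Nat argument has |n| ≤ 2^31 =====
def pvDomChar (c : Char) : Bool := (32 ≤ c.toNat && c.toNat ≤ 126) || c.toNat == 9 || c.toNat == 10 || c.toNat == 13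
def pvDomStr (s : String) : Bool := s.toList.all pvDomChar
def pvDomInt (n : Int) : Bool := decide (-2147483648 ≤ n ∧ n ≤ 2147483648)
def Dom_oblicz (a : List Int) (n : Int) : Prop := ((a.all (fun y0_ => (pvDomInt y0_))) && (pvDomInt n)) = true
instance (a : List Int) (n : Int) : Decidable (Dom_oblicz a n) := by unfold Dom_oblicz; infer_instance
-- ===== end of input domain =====

-- B replaces A's per-client full re-sort (sort, bump the head, sort again) by a single initial
-- sort plus a binary-search re-insertion of the updated head, returning the last element instead
-- of max (objective: faster; return value only — both versions mutate only their local lists).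

-- ===== PORT A =====
-- step of A's loop body: kasy.sort(); kasy[0] += klient[x]
def obliczStepA (kasy : List Int) (c : Int) : List Int :=
  match PySem.List.sorted kasy (fun y => y) false with
  | [] => []            -- Python raises IndexError here; unreachable under Pre_
  | h :: t => (h + c) :: t

def oblicz (a : List Int) (n : Int) : Int :=
  let kasy := PySem.List.slice a none (some n)
  let klient := PySem.List.slice a (some n) none
  let kasy := PySem.List.sorted kasy (fun y => y) false
  let kasy := (PySem.List.pyRange 0 (PySem.List.len klient)).foldl
      (fun kasy x => obliczStepA kasy (PySem.List.pyGetD klient x 0)) kasy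
  match PySem.List.max? kasy (fun y => y) with
  | some r => r
  | none => 0           -- Python raises ValueError on max([]); unreachable under Pre_

-- ===== PORT B =====
-- the while-loop binary search: while lo < hi: mid = (lo+hi)//2; ...
-- (lo, hi stay non-negative in Python, so Nat models them exactly; (lo+hi)//2 is Nat division)
def obliczBisect (kasy : List Int) (x : Int) (lo hi : Nat) : Nat :=
  if lo < hi then
    let mid := (lo + hi) / 2
    if PySem.List.pyGetD kasy (mid : Int) 0 < x then obliczBisect kasy x (mid + 1) hi
    else obliczBisect kasy x lo mid
  else lo
termination_by hi - lo
decreasing_by all_goals omega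

-- loop body: x = kasy[0] + c; kasy.pop(0); binary-search lo; kasy.insert(lo, x)
def obliczStepB (kasy : List Int) (c : Int) : List Int :=
  match kasy with
  | [] => []            -- Python raises IndexError here; unreachable under Pre_
  | h :: rest =>
    let x := h + c
    let lo := obliczBisect rest x 0 rest.length
    PySem.List.insert rest (lo : Int) x

def oblicz_alt (a : List Int) (n : Int) : Int :=
  let kasy := PySem.List.sorted (PySem.List.slice a none (some n)) (fun y => y) false
  let kasy := (PySem.List.slice a (some n) none).foldl obliczStepB kasy
  PySem.List.pyGetD kasy (-1) 0   -- kasy[-1]; Python raises on empty, excluded by Pre_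

-- ===== PRECONDITION & SPEC =====
-- Pre_ excludes exactly the inputs where a[:n] is empty: there A raises (IndexError on kasy[0] or
-- ValueError on max([])), and B raises as well.
def Pre_oblicz (a : List Int) (n : Int) : Prop := PySem.List.slice a none (some n) ≠ []
instance (a : List Int) (n : Int) : Decidable (Pre_oblicz a n) := by unfold Pre_oblicz; infer_instance
def pvWitness_oblicz : List Int × Int := ([3, 1, 2, 4], 2)

def Spec_oblicz (a : List Int) (n : Int) (out : Int) : Prop := out = oblicz_alt a n
instance (a : List Int) (n : Int) (out : Int) : Decidable (Spec_oblicz a n out) := by unfold Spec_oblicz; infer_instance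

-- ===== CLAIM (what is proved, stated in full; the proofs are below) =====
def Claim_equal_oblicz : Prop := ∀ (a : List Int) (n : Int), Dom_oblicz a n → Pre_oblicz a n → Spec_oblicz a n (oblicz a n)

-- ===== LEMMAS AND PROOFS =====

-- elements strictly inside the takeWhile prefix satisfy the predicate
theorem takeWhile_getD (p : Int → Bool) :
    ∀ (l : List Int) (i : Nat), i < (l.takeWhile p).length → p (l.getD i 0) = true := by
  intro l
  induction l with
  | nil => intro i h; simp at h
  | cons a t ih =>
    intro i h
    by_cases hpa : p a = true
    · cases i with
      | zero => simpa using hpa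
      | succ j => simp only [List.takeWhile_cons, hpa, if_true] at h; simpa using ih j (by simpa using h)
    · simp only [List.takeWhile_cons] at h
      rw [Bool.not_eq_true] at hpa
      simp [hpa] at h

-- the element just after the takeWhile prefix fails the predicate
theorem takeWhile_nth_false (p : Int → Bool) :
    ∀ (l : List Int), (l.takeWhile p).length < l.length →
      p (l.getD (l.takeWhile p).length 0) = false := by
  intro l
  induction l with
  | nil => intro h; simp at h
  | cons a t ih =>
    intro h
    by_cases hpa : p a = true
    · simp only [List.takeWhile_cons, hpa, if_true] at *
      simpa using ih (by simpa using h)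
    · rw [Bool.not_eq_true] at hpa
      simp [hpa]

-- the takeWhile length is the unique cut point
theorem tw_len_unique (p : Int → Bool) (l : List Int) (k : Nat) (hk : k ≤ l.length)
    (h1 : ∀ i < k, p (l.getD i 0) = true)
    (h2 : k < l.length → p (l.getD k 0) = false) :
    k = (l.takeWhile p).length := by
  have hm : (l.takeWhile p).length ≤ l.length := (l.takeWhile_sublist p).length_le
  rcases lt_trichotomy k (l.takeWhile p).length with hlt | heq | hgt
  · have := takeWhile_getD p l k hlt
    rw [h2 (lt_of_lt_of_le hlt hm)] at this
    exact absurd this (by simp)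
  · exact heq
  · have := takeWhile_nth_false p l (lt_of_lt_of_le hgt hk)
    rw [h1 _ hgt] at this
    exact absurd this (by simp)

-- sorted lists are getD-monotone
theorem pairwise_getD_mono (l : List Int) (hpw : l.Pairwise (· ≤ ·)) (i j : Nat)
    (hij : i ≤ j) (hj : j < l.length) : l.getD i 0 ≤ l.getD j 0 := by
  rcases Nat.lt_or_eq_of_le hij with hlt | rfl
  · have := List.pairwise_iff_getElem.mp hpw i j (lt_trans hlt hj) hj hlt
    rw [List.getD_eq_getElem l 0 (lt_trans hlt hj), List.getD_eq_getElem l 0 hj]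
    exact this
  · exact le_refl _

-- correctness of the binary search on a sorted list (loop invariant on [lo, hi))
theorem bisect_inv (l : List Int) (x : Int) (hpw : l.Pairwise (· ≤ ·)) :
    ∀ (d lo hi : Nat), hi - lo ≤ d → lo ≤ hi → hi ≤ l.length →
      (∀ i < lo, l.getD i 0 < x) →
      (∀ i, hi ≤ i → i < l.length → ¬ l.getD i 0 < x) →
      obliczBisect l x lo hi = (l.takeWhile (fun y => decide (y < x))).length := by
  intro d
  induction d with
  | zero =>
    intro lo hi hd hlh hhl h1 h2
    have : lo = hi := by omega
    subst this
    rw [obliczBisect]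
    simp only [lt_irrefl, if_false]
    exact tw_len_unique _ l lo (le_trans hlh hhl) (fun i hi => by simpa using h1 i hi)
      (fun hlen => by simpa using h2 lo (le_refl _) hlen)
  | succ d ih =>
    intro lo hi hd hlh hhl h1 h2
    rw [obliczBisect]
    by_cases hlohi : lo < hi
    · simp only [hlohi, if_true]
      have hmlo : lo ≤ (lo + hi) / 2 := by omega
      have hmhi : (lo + hi) / 2 < hi := by omega
      by_cases hmid : PySem.List.pyGetD l (((lo + hi) / 2 : Nat) : Int) 0 < x
      · simp only [hmid, if_true]
        refine ih ((lo + hi) / 2 + 1) hi (by omega) (by omega) hhl ?_ h2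
        intro i hi'
        have : l.getD i 0 ≤ l.getD ((lo + hi) / 2) 0 :=
          pairwise_getD_mono l hpw i _ (by omega) (by omega)
        have hmid' : l.getD ((lo + hi) / 2) 0 < x := by
          rw [← PySem.List.pyGetD_natCast l ((lo + hi) / 2) 0]; exact hmid
        omega
      · simp only [hmid, if_false]
        refine ih lo ((lo + hi) / 2) (by omega) (by omega) (by omega) h1 ?_
        intro i hi' hil
        have : l.getD ((lo + hi) / 2) 0 ≤ l.getD i 0 :=
          pairwise_getD_mono l hpw _ i (by omega) hil
        have hmid' : ¬ l.getD ((lo + hi) / 2) 0 < x := by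
          rw [← PySem.List.pyGetD_natCast l ((lo + hi) / 2) 0]; exact hmid
        omega
    · simp only [hlohi, if_false]
      have : lo = hi := by omega
      subst this
      exact tw_len_unique _ l lo (le_trans hlh hhl) (fun i hi => by simpa using h1 i hi)
        (fun hlen => by simpa using h2 lo (le_refl _) hlen)

-- B's binary-search insertion is Mathlib's orderedInsert (on a sorted tail)
theorem stepB_eq_orderedInsert (h c : Int) (rest : List Int)
    (hpw : rest.Pairwise (· ≤ ·)) :
    obliczStepB (h :: rest) c = List.orderedInsert (· ≤ ·) (h + c) rest := by
  simp only [obliczStepB]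
  set x := h + c with hx
  set p : Int → Bool := fun y => decide (y < x) with hp
  have hk : obliczBisect rest x 0 rest.length = (rest.takeWhile p).length :=
    bisect_inv rest x hpw rest.length 0 rest.length (by omega) (by omega) (le_refl _)
      (by omega) (fun i h1 h2 => absurd h1 (by omega))
  rw [hk, PySem.List.insert_natCast rest _ x ((rest.takeWhile_sublist p).length_le)]
  have htake := List.take_left (l₁ := rest.takeWhile p) (l₂ := rest.dropWhile p)
  have hdrop := List.drop_left (l₁ := rest.takeWhile p) (l₂ := rest.dropWhile p)
  rw [List.takeWhile_append_dropWhile] at htake hdrop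
  rw [htake, hdrop, List.orderedInsert_eq_take_drop]
  have hq : ∀ y : Int, (decide (y < x)) = (decide ¬ x ≤ y) :=
    fun y => decide_eq_decide.mpr (by omega)
  simp [hp, hq]

-- one step: B applied to the sorted state equals the sorted image of A's step
theorem stepB_sorted (s : List Int) (c : Int) :
    obliczStepB (PySem.List.sorted s (fun y => y) false) c
      = PySem.List.sorted (obliczStepA s c) (fun y => y) false := by
  unfold obliczStepA
  rcases hs : PySem.List.sorted s (fun y => y) false with _ | ⟨h, t⟩
  · simp [obliczStepB, PySem.List.sorted]
  · have hpw : t.Pairwise (· ≤ ·) := by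
      have := PySem.List.sorted_pairwise (xs := s) (key := fun y => y)
      rw [hs] at this; exact (List.pairwise_cons.mp this).2
    rw [stepB_eq_orderedInsert _ _ _ hpw]
    symm
    exact PySem.List.sorted_id_eq_of_perm_of_pairwise _ _
      (List.perm_orderedInsert _ _ _)
      (List.Pairwise.orderedInsert (h + c) t hpw)

-- the whole loop: B's fold over the clients is the sorted image of A's fold
theorem fold_sorted (l : List Int) (s : List Int) :
    l.foldl obliczStepB (PySem.List.sorted s (fun y => y) false)
      = PySem.List.sorted (l.foldl obliczStepA s) (fun y => y) false := by
  induction l generalizing s with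
  | nil => rfl
  | cons c l ih => simp only [List.foldl_cons, stepB_sorted s c, ih (obliczStepA s c)]

-- A's step keeps a nonempty list nonempty
theorem stepA_ne_nil (s : List Int) (c : Int) (hs : s ≠ []) : obliczStepA s c ≠ [] := by
  unfold obliczStepA
  rcases h : PySem.List.sorted s (fun y => y) false with _ | ⟨a, t⟩
  · exact absurd ((PySem.List.sorted_eq_nil_iff _ _ _).mp h) hs
  · simp

theorem foldA_ne_nil (l : List Int) (s : List Int) (hs : s ≠ []) :
    l.foldl obliczStepA s ≠ [] := by
  induction l generalizing s with
  | nil => exact hs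
  | cons c l ih => exact ih _ (stepA_ne_nil s c hs)

-- a Pairwise-(≤) list is bounded by its last element
theorem pairwise_le_getLast (l : List Int) (hne : l ≠ []) (hp : l.Pairwise (· ≤ ·)) :
    ∀ y ∈ l, y ≤ l.getLast hne := by
  induction l with
  | nil => exact absurd rfl hne
  | cons a t ih =>
    intro y hy
    rcases List.mem_cons.mp hy with rfl | hyt
    · rcases eq_or_ne t [] with rfl | ht
      · simp
      · rw [List.getLast_cons ht]
        exact (List.pairwise_cons.mp hp).1 _ (List.getLast_mem ht)
    · have ht : t ≠ [] := List.ne_nil_of_mem hyt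
      rw [List.getLast_cons ht]
      exact ih ht (List.pairwise_cons.mp hp).2 y hyt

-- max of a nonempty list is the last element of its sorted version
theorem max_eq_getLast_sorted (s : List Int) (hs : s ≠ []) :
    (match PySem.List.max? s (fun y => y) with | some r => r | none => 0)
      = PySem.List.pyGetD (PySem.List.sorted s (fun y => y) false) (-1) 0 := by
  have hsn : PySem.List.sorted s (fun y => y) false ≠ [] :=
    fun h => hs ((PySem.List.sorted_eq_nil_iff _ _ _).mp h)
  rw [PySem.List.pyGetD_neg_one _ 0 hsn]
  rcases hm : PySem.List.max? s (fun y => y) with _ | m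
  · exact absurd ((PySem.List.max?_eq_none_iff _ _).mp hm) hs
  · show m = _
    have hmem : m ∈ s := PySem.List.max?_mem hm
    have hmax : ∀ y ∈ s, y ≤ m := PySem.List.max?_isMax hm
    have hpw : (PySem.List.sorted s (fun y => y) false).Pairwise (· ≤ ·) := by
      simpa using PySem.List.sorted_pairwise (xs := s) (key := fun y => y)
    have hl : (PySem.List.sorted s (fun y => y) false).getLast hsn ∈ s :=
      (PySem.List.mem_sorted _ _ _ _).mp (List.getLast_mem hsn)
    have hm' : m ∈ PySem.List.sorted s (fun y => y) false :=
      (PySem.List.mem_sorted _ _ _ _).mpr hmem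
    exact le_antisymm (pairwise_le_getLast _ hsn hpw m hm') (hmax _ hl)

-- ===== VERDICT (by name: the statement is the Claim_ definition above) =====
theorem oblicz_spec : Claim_equal_oblicz := by
  intro a n _ hpre
  unfold Spec_oblicz oblicz oblicz_alt
  simp only
  rw [PySem.List.foldl_pyRange_pyGetD _ 0 _ _ (le_refl (0:Int))]
  simp only [Int.toNat_zero, List.drop_zero]
  have h0 : PySem.List.sorted (PySem.List.slice a none (some n)) (fun y => y) false ≠ [] :=
    fun h => hpre ((PySem.List.sorted_eq_nil_iff _ _ _).mp h)
  conv_rhs => rw [← PySem.List.sorted_sorted (PySem.List.slice a none (some n)) (fun y => y)]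
  rw [fold_sorted]
  exact max_eq_getLast_sorted _ (foldA_ne_nil _ _ h0)
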